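-- pv_equiv track=rewrite | github.com/jonm8116/Undergrad_Coursework | CSE_307/python/hw2/socialresist.py | modifyarr
-- ===== SOURCE A (Python) =====
-- def modifyarr(arr):
-- 	newlist = []
-- 	for i in range(0, len(arr)):
-- 		if(i%2==0):
-- 			newlist.append(arr[i])
-- 		else:
-- 			newlist.append(' ')
-- 			newlist.append(arr[i])
-- 			if(i != len(arr)-1):
-- 				newlist.append(' ')
--
-- 	return newlist
-- ===== SOURCE B (Python) =====
-- def modifyarr(arr):
--     newlist = []
--     for i, x in enumerate(arr):
--         if i > 0:
--             newlist.append(' ')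
--         newlist.append(x)
--     return newlist
-- ===== Notes on version B (the rewrite author's own statement) =====
-- stated objective: simpler
-- what changed: A's even/odd parity branches plus the len(arr)-1 special case collapse to one uniform enumerate loop that appends a single ' ' before every element except the first (plain interspersing).
import Mathlib
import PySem

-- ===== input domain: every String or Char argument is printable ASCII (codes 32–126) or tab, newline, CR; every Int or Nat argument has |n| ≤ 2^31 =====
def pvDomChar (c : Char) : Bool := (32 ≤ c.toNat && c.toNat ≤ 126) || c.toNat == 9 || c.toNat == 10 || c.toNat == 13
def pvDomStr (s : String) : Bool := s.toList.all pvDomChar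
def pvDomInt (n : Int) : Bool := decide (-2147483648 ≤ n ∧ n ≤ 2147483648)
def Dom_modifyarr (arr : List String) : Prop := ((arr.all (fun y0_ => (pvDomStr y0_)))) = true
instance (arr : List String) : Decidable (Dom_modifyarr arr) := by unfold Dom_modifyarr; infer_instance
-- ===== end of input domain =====

-- B replaces A's even/odd parity branches and the len(arr)-1 special case with one uniform
-- enumerate loop that appends ' ' before every element except the first (simpler decomposition).


-- ===== PORT A =====
def modifyarr (arr : List String) : List String :=
  (PySem.List.pyRange 0 (PySem.List.len arr)).foldl
    (fun newlist i =>
      if PySem.Int.mod i 2 == 0 then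
        newlist ++ [PySem.List.pyGetD arr i ""]
      else
        ((newlist ++ [" "]) ++ [PySem.List.pyGetD arr i ""]) ++
          (if i != PySem.List.len arr - 1 then [" "] else []))
    []

-- ===== PORT B =====
def modifyarr_alt (arr : List String) : List String :=
  (PySem.List.enumerate arr).foldl
    (fun newlist p => (if p.1 > 0 then newlist ++ [" "] else newlist) ++ [p.2])
    []

-- ===== PRECONDITION & SPEC =====
def Spec_modifyarr (arr : List String) (out : List String) : Prop := out = modifyarr_alt arr
instance (arr : List String) (out : List String) : Decidable (Spec_modifyarr arr out) := by unfold Spec_modifyarr; infer_instance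

-- ===== CLAIM (what is proved, stated in full; the proofs are below) =====
def Claim_equal_modifyarr : Prop := ∀ (arr : List String), Dom_modifyarr arr → Spec_modifyarr arr (modifyarr arr)

-- ===== LEMMAS AND PROOFS =====

-- canonical value: the elements of arr with a single " " between consecutive elements
def pvCanon (xs : List String) : List String :=
  match xs with
  | [] => []
  | x :: rest => x :: rest.flatMap (fun y => [" ", y])

-- per-index contribution of A's loop body
def pvFA (arr : List String) (i : Int) : List String :=
  if PySem.Int.mod i 2 == 0 then [PySem.List.pyGetD arr i ""]
  else ([" "] ++ [PySem.List.pyGetD arr i ""]) ++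
        (if i != PySem.List.len arr - 1 then [" "] else [])

theorem pvA_foldl_flat (arr : List String) (l : List Int) (acc : List String) :
    l.foldl
      (fun newlist i =>
        if PySem.Int.mod i 2 == 0 then
          newlist ++ [PySem.List.pyGetD arr i ""]
        else
          ((newlist ++ [" "]) ++ [PySem.List.pyGetD arr i ""]) ++
            (if i != PySem.List.len arr - 1 then [" "] else [])) acc
    = acc ++ l.flatMap (pvFA arr) := by
  induction l generalizing acc with
  | nil => simp
  | cons i l ih =>
    simp only [List.foldl_cons, List.flatMap_cons, ih, pvFA]
    split_ifs <;> simp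

theorem pvB_foldl (xs : List String) (s : Int) (acc : List String) (hs : 1 ≤ s) :
    (PySem.List.enumerate xs s).foldl
      (fun newlist p => (if p.1 > 0 then newlist ++ [" "] else newlist) ++ [p.2]) acc
    = acc ++ xs.flatMap (fun y => [" ", y]) := by
  induction xs generalizing s acc with
  | nil => simp [PySem.List.enumerate_nil]
  | cons x xs ih =>
    rw [PySem.List.enumerate_cons]
    simp only [List.foldl_cons]
    rw [if_pos (by omega : s > (0:Int)), ih (s + 1) _ (by omega)]
    simp

theorem pvB_eq (arr : List String) : modifyarr_alt arr = pvCanon arr := by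
  cases arr with
  | nil => rfl
  | cons x xs =>
    unfold modifyarr_alt
    rw [PySem.List.enumerate_cons]
    simp only [List.foldl_cons, zero_add]
    rw [if_neg (by omega : ¬ ((0 : Int) > 0)), pvB_foldl xs 1 _ (by omega)]
    rfl

theorem pvA_flat_canon (arr : List String) (xs : List String) (s : Int)
    (h0 : 0 ≤ s) (hn : s + xs.length = (arr.length : Int))
    (hd : arr.drop s.toNat = xs) :
    (PySem.List.pyRange s (PySem.List.len arr)).flatMap (pvFA arr)
    = if s % 2 = 0 then pvCanon xs else xs.flatMap (fun y => [" ", y]) := by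
  induction xs generalizing s with
  | nil =>
    simp only [List.length_nil, Nat.cast_zero, add_zero] at hn
    rw [PySem.List.pyRange_one_eq_nil (by rw [PySem.List.len_eq]; omega)]
    split <;> simp [pvCanon]
  | cons x rest ih =>
    simp only [List.length_cons] at hn
    push_cast at hn
    have hlt : s.toNat < arr.length := by omega
    have hdc := List.drop_eq_getElem_cons hlt
    have h2 := hd.symm.trans hdc
    injection h2 with hx hrest
    have hget : PySem.List.pyGetD arr s "" = x := by
      rw [PySem.List.pyGetD_eq_getElem arr "" h0 (by omega)]
      exact hx.symm
    have hd' : arr.drop (s + 1).toNat = rest := by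
      have h1 : (s + 1).toNat = s.toNat + 1 := by omega
      rw [h1]
      exact hrest.symm
    rw [PySem.List.pyRange_one_cons (by rw [PySem.List.len_eq]; omega)]
    simp only [List.flatMap_cons]
    rw [ih (s + 1) (by omega) (by omega) hd']
    by_cases hp : s % 2 = 0
    · have hfa : pvFA arr s = [x] := by
        unfold pvFA
        rw [PySem.Int.mod_eq_emod_of_pos (by omega), hget]
        simp [hp]
      rw [hfa, if_pos hp, if_neg (show ¬ (s + 1) % 2 = 0 by omega)]
      simp [pvCanon]
    · have hfa : pvFA arr s = [" ", x] ++ (if s ≠ (arr.length : Int) - 1 then [" "] else []) := by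
        unfold pvFA
        rw [PySem.Int.mod_eq_emod_of_pos (by omega), hget]
        simp [hp, bne_iff_ne, PySem.List.len_eq]
      rw [hfa, if_neg hp, if_pos (show (s + 1) % 2 = 0 by omega)]
      cases rest with
      | nil =>
        rw [if_neg (show ¬ s ≠ (arr.length : Int) - 1 by simp at hn; omega)]
        simp [pvCanon]
      | cons r rs =>
        rw [if_pos (show s ≠ (arr.length : Int) - 1 by simp at hn; omega)]
        simp [pvCanon]

theorem pvA_eq (arr : List String) : modifyarr arr = pvCanon arr := by
  unfold modifyarr
  rw [pvA_foldl_flat,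
      pvA_flat_canon arr arr 0 (by omega) (by omega) (by simp)]
  simp

-- ===== VERDICT (by name: the statement is the Claim_ definition above) =====
theorem modifyarr_spec : Claim_equal_modifyarr := by
  intro arr _
  unfold Spec_modifyarr
  rw [pvA_eq, pvB_eq]
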